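-- pv_equiv track=rewrite | github.com/pypi-data/pypi-mirror-389 | packages/swingft-test-v3/swingft_test_v3-1.4.0-py3-none-any.whl/swingft_cli/Obfuscation_Pipeline/Opaquepredicate/run_opaque.py | has_top_level_where
-- ===== SOURCE A (Python) =====
-- def is_ident_char(c: str) -> bool:
--     return c.isalnum() or c == '_'
--
-- def has_top_level_where(s: str) -> bool:
--     i=0; n=len(s)
--     in_sl=in_ml=in_str=False; esc=False; depth=0
--     while i<n:
--         ch=s[i]
--         if in_sl:
--             if ch=='\n': in_sl=False; i+=1; continue
--             i+=1; continue
--         if in_ml: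
--             if ch=='*' and i+1<n and s[i+1]=='/': in_ml=False; i+=2; continue
--             i+=1; continue
--         if in_str:
--             if esc: esc=False
--             elif ch=='\\': esc=True
--             elif ch=='"': in_str=False
--             i+=1; continue
--         if ch=='/' and i+1<n and s[i+1]=='/': in_sl=True; i+=2; continue
--         if ch=='/' and i+1<n and s[i+1]=='*': in_ml=True; i+=2; continue
--         if ch=='"': in_str=True; i+=1; continue
--         if ch=='(':
--             depth+=1; i+=1; continue
--         if ch==')':
--             depth=max(0,depth-1); i+=1; continue
--         if depth==0 and s.startswith("where", i):
--             left_ok = (i==0 or not is_ident_char(s[i-1]))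
--             right_ok = (i+5>=n or not is_ident_char(s[i+5]))
--             if left_ok and right_ok:
--                 return True
--         i+=1
--     return False
-- ===== SOURCE B (Python) =====
-- def _is_ident(c):
--     return c.isalnum() or c == '_'
--
-- def has_top_level_where(s):
--     n = len(s)
--     # pass 1: collect (index, paren depth) of every position scanned in code mode
--     spots = []
--     mode = 'code'
--     esc = False
--     depth = 0
--     i = 0
--     while i < n:
--         c = s[i]
--         if mode == 'sl':
--             if c == '\n':
--                 mode = 'code'
--             i += 1
--         elif mode == 'ml':
--             if c == '*' and s[i + 1:i + 2] == '/':
--                 mode = 'code'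
--                 i += 2
--             else:
--                 i += 1
--         elif mode == 'str':
--             if esc:
--                 esc = False
--             elif c == '\\':
--                 esc = True
--             elif c == '"':
--                 mode = 'code'
--             i += 1
--         elif c == '/' and s[i + 1:i + 2] == '/':
--             mode = 'sl'
--             i += 2
--         elif c == '/' and s[i + 1:i + 2] == '*':
--             mode = 'ml'
--             i += 2
--         elif c == '"':
--             mode = 'str'
--             i += 1
--         elif c == '(':
--             depth += 1
--             i += 1
--         elif c == ')':
--             depth = max(0, depth - 1)
--             i += 1
--         else:
--             spots.append((i, depth))
--             i += 1
--     # pass 2: look for 'where' at a depth-0 code spot with identifier boundaries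
--     return any(
--         d == 0 and s[i:i + 5] == 'where'
--         and (i == 0 or not _is_ident(s[i - 1]))
--         and (i + 5 >= n or not _is_ident(s[i + 5]))
--         for i, d in spots)
-- ===== Notes on version B (the rewrite author's own statement) =====
-- stated objective: alternative
-- what changed: A detects 'where' inline during a single state-machine scan with early return; B decomposes the task into a tokenizing pass that collects the (index, paren-depth) of every code position and a second pass that searches those positions for a 'where' with identifier boundaries.
import Mathlib
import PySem

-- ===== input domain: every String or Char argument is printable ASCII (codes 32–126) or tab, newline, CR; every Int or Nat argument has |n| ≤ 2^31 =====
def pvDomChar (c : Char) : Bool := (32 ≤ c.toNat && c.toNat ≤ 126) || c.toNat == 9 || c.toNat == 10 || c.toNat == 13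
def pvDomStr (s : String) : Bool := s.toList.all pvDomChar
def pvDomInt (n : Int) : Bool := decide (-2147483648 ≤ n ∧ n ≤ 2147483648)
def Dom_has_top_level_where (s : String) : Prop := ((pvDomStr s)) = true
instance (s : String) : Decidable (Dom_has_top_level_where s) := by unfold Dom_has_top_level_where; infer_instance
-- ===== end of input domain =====

-- B replaces A's single scan with inline early return by a two-pass decomposition:
-- pass 1 collects the (index, paren depth) of every code position, pass 2 searches them for 'where'.

-- ===== PORT A =====
def is_ident_char (c : Char) : Bool := c.isAlphanum || c == '_'
def aLoop (cs : List Char) (i : Nat) (in_sl in_ml in_str esc : Bool) (depth : Int) : Bool :=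
  if h : i < cs.length then
    let ch := cs.getD i ' '
    if in_sl then
      if ch == '\n' then aLoop cs (i+1) false in_ml in_str esc depth
      else aLoop cs (i+1) in_sl in_ml in_str esc depth
    else if in_ml then
      if ch == '*' && decide (i+1 < cs.length) && (cs.getD (i+1) ' ' == '/') then
        aLoop cs (i+2) in_sl false in_str esc depth
      else aLoop cs (i+1) in_sl in_ml in_str esc depth
    else if in_str then
      if esc then aLoop cs (i+1) in_sl in_ml in_str false depth
      else if ch == '\\' then aLoop cs (i+1) in_sl in_ml in_str true depth
      else if ch == '"' then aLoop cs (i+1) in_sl in_ml false esc depth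
      else aLoop cs (i+1) in_sl in_ml in_str esc depth
    else if ch == '/' && decide (i+1 < cs.length) && (cs.getD (i+1) ' ' == '/') then
      aLoop cs (i+2) true in_ml in_str esc depth
    else if ch == '/' && decide (i+1 < cs.length) && (cs.getD (i+1) ' ' == '*') then
      aLoop cs (i+2) in_sl true in_str esc depth
    else if ch == '"' then aLoop cs (i+1) in_sl in_ml true esc depth
    else if ch == '(' then aLoop cs (i+1) in_sl in_ml in_str esc (depth+1)
    else if ch == ')' then aLoop cs (i+1) in_sl in_ml in_str esc (max 0 (depth-1))
    else if depth == 0 && PySem.Chars.startswith (cs.drop i) "where".toList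
         && (i == 0 || !is_ident_char (cs.getD (i-1) ' '))
         && (decide (i+5 ≥ cs.length) || !is_ident_char (cs.getD (i+5) ' ')) then true
    else aLoop cs (i+1) in_sl in_ml in_str esc depth
  else false
termination_by cs.length - i

def has_top_level_where (s : String) : Bool :=
  aLoop s.toList 0 false false false false 0

-- ===== PORT B =====
def identChar (c : Char) : Bool := c.isAlphanum || c == '_'
inductive ScanMode | code | sl | ml | str
deriving DecidableEq, Repr
def bSpots (cs : List Char) (i : Nat) (mode : ScanMode) (esc : Bool) (depth : Int) : List (Nat × Int) :=
  if h : i < cs.length then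
    let c := cs.getD i ' '
    match mode with
    | .sl =>
      if c == '\n' then bSpots cs (i+1) .code esc depth else bSpots cs (i+1) .sl esc depth
    | .ml =>
      if c == '*' && PySem.List.slice cs (some ((i+1 : Nat) : Int)) (some ((i+2 : Nat) : Int)) == ['/'] then
        bSpots cs (i+2) .code esc depth
      else bSpots cs (i+1) .ml esc depth
    | .str =>
      if esc then bSpots cs (i+1) .str false depth
      else if c == '\\' then bSpots cs (i+1) .str true depth
      else if c == '"' then bSpots cs (i+1) .code esc depth
      else bSpots cs (i+1) .str esc depth
    | .code =>
      if c == '/' && PySem.List.slice cs (some ((i+1 : Nat) : Int)) (some ((i+2 : Nat) : Int)) == ['/'] then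
        bSpots cs (i+2) .sl esc depth
      else if c == '/' && PySem.List.slice cs (some ((i+1 : Nat) : Int)) (some ((i+2 : Nat) : Int)) == ['*'] then
        bSpots cs (i+2) .ml esc depth
      else if c == '"' then bSpots cs (i+1) .str esc depth
      else if c == '(' then bSpots cs (i+1) .code esc (depth+1)
      else if c == ')' then bSpots cs (i+1) .code esc (max 0 (depth-1))
      else (i, depth) :: bSpots cs (i+1) .code esc depth
  else []
termination_by cs.length - i
def bHit (cs : List Char) (p : Nat × Int) : Bool :=
  p.2 == 0 && (PySem.List.slice cs (some ((p.1 : Nat) : Int)) (some ((p.1+5 : Nat) : Int)) == "where".toList)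
  && (p.1 == 0 || !identChar (cs.getD (p.1-1) ' '))
  && (decide (p.1+5 ≥ cs.length) || !identChar (cs.getD (p.1+5) ' '))


def has_top_level_where_alt (s : String) : Bool :=
  (bSpots s.toList 0 .code false 0).any (bHit s.toList)

-- ===== PRECONDITION & SPEC =====
def Spec_has_top_level_where (s : String) (out : Bool) : Prop := out = has_top_level_where_alt s
instance (s : String) (out : Bool) : Decidable (Spec_has_top_level_where s out) := by unfold Spec_has_top_level_where; infer_instance

-- ===== CLAIM (what is proved, stated in full; the proofs are below) =====
def Claim_equal_has_top_level_where : Prop := ∀ (s : String), Dom_has_top_level_where s → Spec_has_top_level_where s (has_top_level_where s)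

-- ===== LEMMAS AND PROOFS =====

theorem slice_lookahead (cs : List Char) (j : Nat) (c : Char) :
    (PySem.List.slice cs (some ((j+1 : Nat) : Int)) (some ((j+2 : Nat) : Int)) == [c])
      = (decide (j+1 < cs.length) && (cs.getD (j+1) ' ' == c)) := by
  rw [PySem.List.slice_natCast]
  have h2 : j + 2 - (j+1) = 1 := by omega
  rw [h2]
  by_cases h : j + 1 < cs.length
  · have hd : List.drop (j+1) cs = cs[j+1] :: List.drop (j+2) cs := by
      rw [List.drop_eq_getElem_cons h]
    rw [hd, List.take_succ_cons, List.take_zero]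
    simp [List.getD, h]
  · rw [List.drop_eq_nil_of_le (by omega)]
    simp [h]

theorem slice_where (cs : List Char) (i : Nat) :
    (PySem.List.slice cs (some ((i : Nat) : Int)) (some ((i+5 : Nat) : Int)) == "where".toList)
      = PySem.Chars.startswith (cs.drop i) "where".toList := by
  rw [PySem.List.slice_natCast]
  have h5 : i + 5 - i = 5 := by omega
  rw [h5]
  generalize cs.drop i = xs
  rw [Bool.eq_iff_iff, beq_iff_eq, PySem.Chars.startswith_iff]
  constructor
  · intro h; rw [← h]; exact List.take_prefix ..
  · intro h
    have := List.prefix_iff_eq_take.mp h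
    simpa using this.symm

def encodeMode (sl ml str : Bool) : ScanMode :=
  if sl then .sl else if ml then .ml else if str then .str else .code


set_option maxHeartbeats 1000000 in
theorem loop_eq (cs : List Char) (i : Nat) (sl ml str esc : Bool) (depth : Int)
    (h1 : sl = true → ml = false ∧ str = false) (h2 : ml = true → str = false) :
    aLoop cs i sl ml str esc depth
      = (bSpots cs i (encodeMode sl ml str) esc depth).any (bHit cs) := by
  cases sl with
  | true =>
    obtain ⟨hm, hs⟩ := h1 rfl; subst hm hs
    rw [aLoop, bSpots]
    by_cases h : i < cs.length
    · simp only [dif_pos h, encodeMode, Bool.false_eq_true, if_false, if_true]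
      split_ifs with c1
      · exact loop_eq cs (i+1) false false false esc depth (by decide) (by decide)
      · exact loop_eq cs (i+1) true false false esc depth (by decide) (by decide)
    · simp [dif_neg h]
  | false =>
    cases ml with
    | true =>
      have hstr := h2 rfl; subst hstr
      rw [aLoop, bSpots]
      by_cases h : i < cs.length
      · simp only [dif_pos h, encodeMode, Bool.false_eq_true, if_false, if_true]
        simp only [slice_lookahead, Bool.and_assoc]
        split_ifs with c1
        · exact loop_eq cs (i+2) false false false esc depth (by decide) (by decide)
        · exact loop_eq cs (i+1) false true false esc depth (by decide) (by decide)
      · simp [dif_neg h]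
    | false =>
      cases str with
      | true =>
        rw [aLoop, bSpots]
        by_cases h : i < cs.length
        · simp only [dif_pos h, encodeMode, Bool.false_eq_true, if_false, if_true]
          split_ifs with c1 c2 c3
          · exact loop_eq cs (i+1) false false true false depth (by decide) (by decide)
          · exact loop_eq cs (i+1) false false true true depth (by decide) (by decide)
          · exact loop_eq cs (i+1) false false false esc depth (by decide) (by decide)
          · exact loop_eq cs (i+1) false false true esc depth (by decide) (by decide)
        · simp [dif_neg h]
      | false =>
        rw [aLoop, bSpots]
        by_cases h : i < cs.length
        · simp only [dif_pos h, encodeMode, Bool.false_eq_true, if_false, if_true]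
          simp only [slice_lookahead, Bool.and_assoc]
          split_ifs with c1 c2 c3 c4 c5 c6
          · exact loop_eq cs (i+2) true false false esc depth (by decide) (by decide)
          · exact loop_eq cs (i+2) false true false esc depth (by decide) (by decide)
          · exact loop_eq cs (i+1) false false true esc depth (by decide) (by decide)
          · exact loop_eq cs (i+1) false false false esc (depth+1) (by decide) (by decide)
          · exact loop_eq cs (i+1) false false false esc (max 0 (depth-1)) (by decide) (by decide)
          · rw [List.any_cons]
            have hb : bHit cs (i, depth) = true := by
              simp only [bHit, slice_where, identChar, Bool.and_assoc]
              simp only [is_ident_char] at c6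
              exact c6
            rw [hb]
            simp
          · rw [List.any_cons]
            have hb : bHit cs (i, depth) = false := by
              simp only [bHit, slice_where, identChar, Bool.and_assoc]
              simp only [is_ident_char] at c6
              exact eq_false_of_ne_true c6
            rw [hb, Bool.false_or]
            exact loop_eq cs (i+1) false false false esc depth (by decide) (by decide)
        · simp [dif_neg h]
termination_by cs.length - i
decreasing_by all_goals omega

-- ===== VERDICT (by name: the statement is the Claim_ definition above) =====
theorem has_top_level_where_spec : Claim_equal_has_top_level_where := by
  intro s _
  unfold Spec_has_top_level_where has_top_level_where has_top_level_where_alt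
  exact loop_eq s.toList 0 false false false false 0 (by decide) (by decide)
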